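-- pv_equiv track=rewrite | github.com/RacleRay/Bank_FAQ_ChatBot | pattern/Optional_pattern_match_chatbot.py | space_split
-- ===== SOURCE A (Python) =====
-- def space_split(strings):
--     "空格分隔字符"
--     pre = '@'
--     line = ''
--     for s in strings:
--         if ord('A') <= ord(pre) <= ord('z') and ord('A') <= ord(s) <= ord('z'):
--             line += s
--         else:
--             line += ' ' + s
--         pre = s
--     return line.split()
-- ===== SOURCE B (Python) =====
-- def space_split(strings):
--     "空格分隔字符"
--     tokens = []
--     word = ''
--     for c in strings:
--         if 'A' <= c <= 'z':
--             word += c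
--         else:
--             if word:
--                 tokens.append(word)
--                 word = ''
--             if not c.isspace():
--                 tokens.append(c)
--     if word:
--         tokens.append(word)
--     return tokens
-- ===== Notes on version B (the rewrite author's own statement) =====
-- stated objective: simpler
-- what changed: A builds an intermediate string with spaces inserted at non-letter boundaries and then calls .split(); B scans the input once and emits tokens directly (letter runs accumulate into a word, other non-whitespace chars become single-char tokens), skipping the intermediate string and the second split pass.
import Mathlib
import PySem

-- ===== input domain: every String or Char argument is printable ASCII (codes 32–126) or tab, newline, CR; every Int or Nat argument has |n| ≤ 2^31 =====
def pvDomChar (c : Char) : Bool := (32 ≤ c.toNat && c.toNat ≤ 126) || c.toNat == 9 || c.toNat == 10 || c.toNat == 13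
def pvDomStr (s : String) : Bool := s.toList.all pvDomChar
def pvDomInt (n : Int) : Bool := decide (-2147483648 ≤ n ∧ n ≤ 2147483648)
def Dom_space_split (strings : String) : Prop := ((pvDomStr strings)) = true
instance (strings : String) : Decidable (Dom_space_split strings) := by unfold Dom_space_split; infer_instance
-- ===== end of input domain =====

-- B replaces A's "build one big string with inserted spaces, then .split()" by a single
-- pass that emits tokens directly (objective: simpler — one pass, no intermediate string).

-- the ord('A') <= ord(c) <= ord('z') test both Pythons use
def pvInR (c : Char) : Bool := decide (65 ≤ c.toNat) && decide (c.toNat ≤ 122)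

-- ===== PORT A =====
-- the body of A's for-loop: state = (pre, line)
def pvStepA (st : Char × List Char) (s : Char) : Char × List Char :=
  if (pvInR st.1 && pvInR s) = true then (s, st.2 ++ [s]) else (s, st.2 ++ [' ', s])

def space_split (strings : String) : List String :=
  let st := strings.toList.foldl pvStepA ('@', [])
  PySem.Str.split₀ (String.ofList st.2)

-- ===== PORT B =====
-- the body of B's for-loop: state = (tokens, word)
def pvStepB (st : List String × List Char) (c : Char) : List String × List Char :=
  if pvInR c = true then (st.1, st.2 ++ [c])
  else
    let out := if st.2.isEmpty then st.1 else st.1 ++ [String.ofList st.2]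
    let out := if PySem.Chars.isspace c then out else out ++ [String.ofList [c]]
    (out, [])

def space_split_alt (strings : String) : List String :=
  let st := strings.toList.foldl pvStepB ([], [])
  if st.2.isEmpty then st.1 else st.1 ++ [String.ofList st.2]

-- ===== PRECONDITION & SPEC =====
def Spec_space_split (strings : String) (out : List String) : Prop := out = space_split_alt strings
instance (strings : String) (out : List String) : Decidable (Spec_space_split strings out) := by unfold Spec_space_split; infer_instance

-- ===== CLAIM (what is proved, stated in full; the proofs are below) =====
def Claim_equal_space_split : Prop := ∀ (strings : String), Dom_space_split strings → Spec_space_split strings (space_split strings)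

-- ===== LEMMAS AND PROOFS =====

-- the line A builds, as a function of the previous character and the remaining input
def pvLine (pre : Char) : List Char → List Char
  | [] => []
  | c :: cs => (if (pvInR pre && pvInR c) = true then [c] else [' ', c]) ++ pvLine c cs

-- the token stream B emits, as a function of the pending word and the remaining input
def pvToks (word : List Char) : List Char → List String
  | [] => if word.isEmpty then [] else [String.ofList word]
  | c :: cs =>
      if pvInR c then pvToks (word ++ [c]) cs
      else (if word.isEmpty then [] else [String.ofList word]) ++
           (if PySem.Chars.isspace c then [] else [String.ofList [c]]) ++ pvToks [] cs

theorem pvInR_not_isspace (c : Char) (h : pvInR c = true) : PySem.Chars.isspace c = false := by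
  simp only [pvInR, Bool.and_eq_true, decide_eq_true_eq] at h
  simp only [PySem.Chars.isspace]
  simp only [Bool.or_eq_false_iff, Bool.and_eq_false_iff, decide_eq_false_iff_not]
  omega

theorem pvLineA (cs : List Char) : ∀ (pre : Char) (line : List Char),
    (cs.foldl pvStepA (pre, line)).2 = line ++ pvLine pre cs := by
  induction cs with
  | nil => intro pre line; simp [pvLine]
  | cons c cs ih =>
    intro pre line
    rw [List.foldl_cons]
    by_cases h : (pvInR pre && pvInR c) = true
    · rw [show pvStepA (pre, line) c = (c, line ++ [c]) from by simp [pvStepA, h]]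
      rw [ih c (line ++ [c])]
      simp [pvLine, h]
    · rw [show pvStepA (pre, line) c = (c, line ++ [' ', c]) from by simp [pvStepA, h]]
      rw [ih c (line ++ [' ', c])]
      simp [pvLine, h]

theorem pvToksB (cs : List Char) : ∀ (out : List String) (word : List Char),
    (let r := cs.foldl pvStepB (out, word)
     if r.2.isEmpty then r.1 else r.1 ++ [String.ofList r.2])
    = out ++ pvToks word cs := by
  induction cs with
  | nil => intro out word; by_cases h : word.isEmpty = true <;> simp [pvToks, h]
  | cons c cs ih =>
    intro out word
    simp only [List.foldl_cons]
    by_cases hc : pvInR c = true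
    · rw [show pvStepB (out, word) c = (out, word ++ [c]) from by simp [pvStepB, hc]]
      rw [ih out (word ++ [c])]
      simp [pvToks, hc]
    · have step : pvStepB (out, word) c =
        ((if word.isEmpty then out else out ++ [String.ofList word]) ++
          (if PySem.Chars.isspace c then [] else [String.ofList [c]]), ([] : List Char)) := by
        by_cases hs : PySem.Chars.isspace c = true <;>
          by_cases hw : word.isEmpty = true <;> simp [pvStepB, hc, hs, hw]
      rw [step, ih _ []]
      by_cases hw : word = [] <;> simp [pvToks, hc, hw]

theorem pvMain (cs : List Char) : ∀ (pre : Char) (cur : List Char) (accs : List (List Char)),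
    (PySem.Chars.split₀.go (pvLine pre cs) cur accs).map String.ofList
    = accs.reverse.map String.ofList ++
      (if pvInR pre then pvToks cur.reverse cs
       else (if cur.isEmpty then [] else [String.ofList cur.reverse]) ++ pvToks [] cs) := by
  induction cs with
  | nil =>
    intro pre cur accs
    by_cases hc : cur.isEmpty = true <;>
      by_cases hp : pvInR pre = true <;>
        simp [pvLine, pvToks, PySem.Chars.split₀.go, hc, hp] <;>
        simp [List.isEmpty_iff] at hc <;> simp [hc]
  | cons c cs ih =>
    intro pre cur accs
    by_cases hb : (pvInR pre && pvInR c) = true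
    · -- both in range: no space inserted, c joins the current word
      obtain ⟨hp, hc⟩ := Bool.and_eq_true_iff.mp hb
      have hns := pvInR_not_isspace c hc
      rw [show pvLine pre (c :: cs) = c :: pvLine c cs from by
            simp [pvLine, hb]]
      rw [show PySem.Chars.split₀.go (c :: pvLine c cs) cur accs
            = PySem.Chars.split₀.go (pvLine c cs) (c :: cur) accs from by
            simp [PySem.Chars.split₀.go, hns]]
      rw [ih c (c :: cur) accs]
      simp [hp, hc, pvToks]
    · -- a space is inserted before c
      rw [show pvLine pre (c :: cs) = ' ' :: c :: pvLine c cs from by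
            simp [pvLine, hb]]
      have hsp : PySem.Chars.isspace ' ' = true := by decide
      by_cases hw : cur.isEmpty = true
      · rw [show PySem.Chars.split₀.go (' ' :: c :: pvLine c cs) cur accs
              = PySem.Chars.split₀.go (c :: pvLine c cs) [] accs from by
              simp [PySem.Chars.split₀.go, hsp, hw]]
        by_cases hs : PySem.Chars.isspace c = true
        · have hc : pvInR c = false := by
            by_contra h; simp only [Bool.not_eq_false] at h
            exact absurd hs (by simp [pvInR_not_isspace c h])
          rw [show PySem.Chars.split₀.go (c :: pvLine c cs) [] accs
                = PySem.Chars.split₀.go (pvLine c cs) [] accs from by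
                simp [PySem.Chars.split₀.go, hs]]
          rw [ih c [] accs]
          simp only [List.isEmpty_iff] at hw
          by_cases hp : pvInR pre = true <;> simp [hp, hc, hs, hw, pvToks]
        · rw [show PySem.Chars.split₀.go (c :: pvLine c cs) [] accs
                = PySem.Chars.split₀.go (pvLine c cs) [c] accs from by
                simp [PySem.Chars.split₀.go, hs]]
          rw [ih c [c] accs]
          simp only [List.isEmpty_iff] at hw
          by_cases hp : pvInR pre = true <;> by_cases hc : pvInR c = true
          all_goals first
            | (simp [hp, hc, hs, hw, pvToks]; done)
            | exact absurd (by simp [hp, hc] : (pvInR pre && pvInR c) = true) hb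
      · rw [show PySem.Chars.split₀.go (' ' :: c :: pvLine c cs) cur accs
              = PySem.Chars.split₀.go (c :: pvLine c cs) [] (cur.reverse :: accs) from by
              simp [PySem.Chars.split₀.go, hsp, hw]]
        by_cases hs : PySem.Chars.isspace c = true
        · have hc : pvInR c = false := by
            by_contra h; simp only [Bool.not_eq_false] at h
            exact absurd hs (by simp [pvInR_not_isspace c h])
          rw [show PySem.Chars.split₀.go (c :: pvLine c cs) [] (cur.reverse :: accs)
                = PySem.Chars.split₀.go (pvLine c cs) [] (cur.reverse :: accs) from by
                simp [PySem.Chars.split₀.go, hs]]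
          rw [ih c [] (cur.reverse :: accs)]
          by_cases hp : pvInR pre = true <;> simp [hp, hc, hs, hw, pvToks]
        · rw [show PySem.Chars.split₀.go (c :: pvLine c cs) [] (cur.reverse :: accs)
                = PySem.Chars.split₀.go (pvLine c cs) [c] (cur.reverse :: accs) from by
                simp [PySem.Chars.split₀.go, hs]]
          rw [ih c [c] (cur.reverse :: accs)]
          by_cases hp : pvInR pre = true <;> by_cases hc : pvInR c = true
          all_goals first
            | (simp [hp, hc, hs, hw, pvToks, List.isEmpty_iff]; done)
            | exact absurd (by simp [hp, hc] : (pvInR pre && pvInR c) = true) hb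

-- ===== VERDICT (by name: the statement is the Claim_ definition above) =====
theorem space_split_spec : Claim_equal_space_split := by
  intro strings _
  unfold Spec_space_split space_split space_split_alt
  simp only
  rw [pvLineA strings.toList '@' []]
  rw [pvToksB strings.toList [] []]
  simp only [List.nil_append]
  have h1 : PySem.Str.split₀ (String.ofList (pvLine '@' strings.toList))
      = (PySem.Chars.split₀.go (pvLine '@' strings.toList) [] []).map String.ofList := by
    simp [PySem.Str.split₀, PySem.Chars.split₀]
  rw [h1, pvMain strings.toList '@' [] []]
  simp
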